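-- pv_equiv track=rewrite | github.com/mohilkhare1708/Competitive-Programming | Misc/Coding/googleFoobar/gfc2.py | returnCoordinates
-- ===== SOURCE A (Python) =====
-- def returnCoordinates(pos):
--     x = 0
--     for i in range(1,9):
--         for j in range(1,9):
--             if x == pos:
--                 return i, j
--             else:
--                 x += 1
-- ===== SOURCE B (Python) =====
-- def returnCoordinates(pos):
--     if not 0 <= pos < 64:
--         raise ValueError("position off the 8x8 board")
--     return pos // 8 + 1, pos % 8 + 1
-- ===== Notes on version B (the rewrite author's own statement) =====
-- stated objective: simpler
-- what changed: Replaces the nested 8x8 counting loop with the direct closed-form divmod mapping pos -> (pos//8+1, pos%8+1) after validating the position; Pre_ excludes pos outside [0, 64), where A falls off its loops and returns None (not a pair) while B raises ValueError.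
-- outside the precondition, e.g. on returnCoordinates(64): A returns None, B raises ValueError; on returnCoordinates(-1): A returns None, B raises ValueError
import Mathlib
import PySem

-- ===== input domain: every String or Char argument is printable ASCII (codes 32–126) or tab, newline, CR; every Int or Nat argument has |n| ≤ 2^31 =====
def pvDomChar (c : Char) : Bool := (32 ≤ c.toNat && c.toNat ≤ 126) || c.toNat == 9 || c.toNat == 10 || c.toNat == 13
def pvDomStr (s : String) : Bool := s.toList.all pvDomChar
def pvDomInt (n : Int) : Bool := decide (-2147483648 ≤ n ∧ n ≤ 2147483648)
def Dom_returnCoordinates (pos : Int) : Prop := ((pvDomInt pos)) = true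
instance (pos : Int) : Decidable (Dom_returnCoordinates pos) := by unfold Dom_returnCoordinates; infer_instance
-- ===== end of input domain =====

-- B replaces A's nested 8x8 counting loop with a validated closed-form divmod mapping (simpler); outside [0, 64) Python A returns None (not a pair) and B raises ValueError, both excluded by Pre_.


-- ===== PORT A =====
-- literal port of A's nested loops with a counter x and early return;
-- the fold state is (found result so far, counter x); (0,0) is the never-reached
-- fall-off value (excluded by Pre_, where Python returns None).
def returnCoordinates (pos : Int) : Int × Int :=
  let st := (PySem.List.pyRange 1 9 1).foldl (fun st i =>
    (PySem.List.pyRange 1 9 1).foldl (fun st2 j =>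
      match st2 with
      | (some r, x) => (some r, x)
      | (none, x) => if x == pos then (some (i, j), x) else (none, x + 1)) st)
    ((none : Option (Int × Int)), (0 : Int))
  match st with
  | (some r, _) => r
  | (none, _) => (0, 0)

-- ===== PORT B =====
-- B validates pos and raises ValueError off the board; that raise-branch
-- (excluded by Pre_) is ported as the dummy (0, 0).
def returnCoordinates_alt (pos : Int) : Int × Int :=
  if ¬ (0 ≤ pos ∧ pos < 64) then (0, 0)
  else (PySem.Int.floordiv pos 8 + 1, PySem.Int.mod pos 8 + 1)

-- ===== PRECONDITION & SPEC =====
-- Pre_ excludes pos outside [0, 64): there Python A falls off its loops and returns None,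
-- which is not a value of the declared pair type (B raises ValueError there).
def Pre_returnCoordinates (pos : Int) : Prop := 0 ≤ pos ∧ pos < 64
instance (pos : Int) : Decidable (Pre_returnCoordinates pos) := by unfold Pre_returnCoordinates; infer_instance
def pvWitness_returnCoordinates : Int := 5
def Spec_returnCoordinates (pos : Int) (out : Int × Int) : Prop := out = returnCoordinates_alt pos
instance (pos : Int) (out : Int × Int) : Decidable (Spec_returnCoordinates pos out) := by unfold Spec_returnCoordinates; infer_instance

-- ===== CLAIM (what is proved, stated in full; the proofs are below) =====
def Claim_equal_returnCoordinates : Prop := ∀ (pos : Int), Dom_returnCoordinates pos → Pre_returnCoordinates pos → Spec_returnCoordinates pos (returnCoordinates pos)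

-- ===== LEMMAS AND PROOFS =====

-- ===== VERDICT (by name: the statement is the Claim_ definition above) =====
theorem returnCoordinates_spec : Claim_equal_returnCoordinates := by
  intro pos _ hpre
  obtain ⟨h0, h64⟩ := hpre
  unfold Spec_returnCoordinates
  interval_cases pos <;> decide
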